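-- pv_equiv track=rewrite | github.com/DaniilIljin/Python---basics | EXAM/exam1/exam.py | mirror_ends
-- ===== SOURCE A (Python) =====
-- def mirror_ends(s: str) -> str:
--     """
--     Return the first non-matching symbol pair from both ends.
--
--     The function has to be recursive. No loops allowed!
--
--     Starting from the beginning and end, find the first symbol pair which does not match.
--     If the input string is a palindrome (the same in reverse) then return "" (empty string).
--
--     mirror_ends("abc") => "ac"
--     mirror_ends("aba") => ""
--     mirror_ends("abca") => "bc"
--     mirror_ends("abAAca") => "bc"
--     mirror_ends("") => ""
--     """
--     if s == '' or len(s) == 1: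
--         return ''
--     else:
--         if s[0] != s[-1]:
--             return s[0] + mirror_ends(s[1:-1]) + s[-1]
--         else:
--             return mirror_ends(s[1:-1])
-- ===== SOURCE B (Python) =====
-- def mirror_ends(s: str) -> str:
--     # Two-pointer single pass: collect mismatched chars from both ends,
--     # then join left part + reversed right part. O(n) vs A's O(n^2) slicing.
--     left = []
--     right = []
--     i, j = 0, len(s) - 1
--     while i < j:
--         if s[i] != s[j]:
--             left.append(s[i])
--             right.append(s[j])
--         i += 1
--         j -= 1
--     return ''.join(left) + ''.join(reversed(right))
-- ===== Notes on version B (the rewrite author's own statement) =====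
-- stated objective: faster
-- what changed: Replaced the double-ended recursion with O(n) slice copies at every step by a single two-pointer index pass that collects mismatched characters into a left list and a right list, joined once at the end.
import Mathlib
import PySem

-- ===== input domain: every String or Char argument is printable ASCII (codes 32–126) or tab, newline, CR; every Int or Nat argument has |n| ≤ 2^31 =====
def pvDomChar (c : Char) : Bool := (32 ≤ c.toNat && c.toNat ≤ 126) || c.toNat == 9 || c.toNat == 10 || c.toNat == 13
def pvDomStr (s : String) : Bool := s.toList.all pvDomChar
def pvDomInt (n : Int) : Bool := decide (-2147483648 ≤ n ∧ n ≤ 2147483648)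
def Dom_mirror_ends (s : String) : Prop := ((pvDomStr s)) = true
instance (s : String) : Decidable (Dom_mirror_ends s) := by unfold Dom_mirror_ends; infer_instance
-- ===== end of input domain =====

-- B replaces A's double-ended recursion (fresh s[1:-1] slice each step, O(n^2))
-- by a single O(n) two-pointer pass collecting mismatched chars into two lists.

-- ===== PORT A =====
-- A's string ops are ported over List Char: s[0] = head, s[-1] = last, s[1:-1] = tail.dropLast.
def mirrorA : List Char → List Char
  | [] => []
  | [_] => []
  | a :: b :: rest =>
    let lst := (b :: rest).getLast (by simp)
    let mid := (b :: rest).dropLast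
    if a ≠ lst then a :: mirrorA mid ++ [lst] else mirrorA mid
termination_by l => l.length
decreasing_by all_goals simp [List.length_dropLast]

def mirror_ends (s : String) : String := String.mk (mirrorA s.toList)

-- ===== PORT B =====
-- while i < j: compare cs[i], cs[j]; append mismatches to left/right; i+=1, j-=1.
def loopB (cs : List Char) (i j : Nat) (left right : List Char) : List Char × List Char :=
  if i < j then
    let ci := cs.getD i ' '
    let cj := cs.getD j ' '
    if ci ≠ cj then loopB cs (i + 1) (j - 1) (left ++ [ci]) (right ++ [cj])
    else loopB cs (i + 1) (j - 1) left right
  else (left, right)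
termination_by j - i

def mirror_ends_alt (s : String) : String :=
  let cs := s.toList
  let p := loopB cs 0 (cs.length - 1) [] []
  String.mk (p.1 ++ p.2.reverse)

-- ===== PRECONDITION & SPEC =====
def Spec_mirror_ends (s : String) (out : String) : Prop := out = mirror_ends_alt s
instance (s : String) (out : String) : Decidable (Spec_mirror_ends s out) := by unfold Spec_mirror_ends; infer_instance

-- ===== CLAIM (what is proved, stated in full; the proofs are below) =====
def Claim_equal_mirror_ends : Prop := ∀ (s : String), Dom_mirror_ends s → Spec_mirror_ends s (mirror_ends s)

-- ===== LEMMAS AND PROOFS =====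

theorem mirrorA_short (l : List Char) (h : l.length ≤ 1) : mirrorA l = [] := by
  match l with
  | [] => simp [mirrorA]
  | [_] => simp [mirrorA]
  | _ :: _ :: _ => simp at h

-- slice cs i j = the characters cs[i..j]
def slice (cs : List Char) (i j : Nat) : List Char := (cs.drop i).take (j + 1 - i)

theorem slice_short (cs : List Char) (i j : Nat) (h : ¬ i < j) :
    mirrorA (slice cs i j) = [] := by
  apply mirrorA_short
  simp only [slice, List.length_take, List.length_drop]
  omega

theorem slice_decomp (cs : List Char) (i j : Nat) (hij : i < j) (hj : j < cs.length) :
    slice cs i j = cs.getD i ' ' :: slice cs (i + 1) (j - 1) ++ [cs.getD j ' '] := by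
  have hi : i < cs.length := by omega
  have hlen : j - i - 1 < (cs.drop (i + 1)).length := by
    simp only [List.length_drop]; omega
  have hdj : (cs.drop (i + 1))[j - i - 1]'hlen = cs[j]'hj := by
    rw [List.getElem_drop]; congr 1; omega
  rw [slice, slice,
      show j + 1 - i = (j - i - 1 + 1) + 1 from by omega,
      show j - 1 + 1 - (i + 1) = j - i - 1 from by omega,
      List.drop_eq_getElem_cons hi, List.take_succ_cons,
      List.take_succ, List.getElem?_eq_getElem hlen, hdj]
  simp [List.getD_eq_getElem?_getD, List.getElem?_eq_getElem hi,
        List.getElem?_eq_getElem hj]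

theorem mirrorA_cons_concat (ci cj : Char) (mid : List Char) :
    mirrorA (ci :: mid ++ [cj]) =
      if ci ≠ cj then ci :: mirrorA mid ++ [cj] else mirrorA mid := by
  match mid with
  | [] => simp [mirrorA]
  | x :: xs =>
    rw [show (ci :: (x :: xs) ++ [cj]) = ci :: x :: (xs ++ [cj]) from by simp, mirrorA]
    have h1 : (x :: (xs ++ [cj])).getLast (by simp) = cj := by
      simp
    have h2 : (x :: (xs ++ [cj])).dropLast = x :: xs := by
      rw [show x :: (xs ++ [cj]) = (x :: xs) ++ [cj] from by simp, List.dropLast_concat]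
    simp only [h1, h2]

theorem loopB_spec (n : Nat) : ∀ (cs : List Char) (i j : Nat) (left right : List Char),
    j - i ≤ n → j < cs.length →
    (loopB cs i j left right).1 ++ (loopB cs i j left right).2.reverse
      = left ++ mirrorA (slice cs i j) ++ right.reverse := by
  induction n with
  | zero =>
    intro cs i j left right hn hj
    have h : ¬ i < j := by omega
    rw [loopB]
    simp [h, slice_short cs i j h]
  | succ n ih =>
    intro cs i j left right hn hj
    by_cases hij : i < j
    · rw [loopB]
      simp only [hij, if_true]
      rw [slice_decomp cs i j hij hj]
      set ci := cs.getD i ' ' with hci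
      set cj := cs.getD j ' ' with hcj
      rw [mirrorA_cons_concat]
      by_cases hne : ci ≠ cj
      · rw [if_pos hne, if_pos hne,
            ih cs (i + 1) (j - 1) (left ++ [ci]) (right ++ [cj]) (by omega) (by omega)]
        simp
      · rw [if_neg hne, if_neg hne,
            ih cs (i + 1) (j - 1) left right (by omega) (by omega)]
    · rw [loopB]
      simp [hij, slice_short cs i j hij]

-- ===== VERDICT (by name: the statement is the Claim_ definition above) =====
theorem mirror_ends_spec : Claim_equal_mirror_ends := by
  intro s _
  unfold Spec_mirror_ends mirror_ends mirror_ends_alt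
  simp only []
  match hcs : s.toList with
  | [] => simp [loopB, mirrorA]
  | c :: cs =>
    have hj : (c :: cs).length - 1 < (c :: cs).length := by simp
    have h := loopB_spec ((c :: cs).length - 1) (c :: cs) 0 ((c :: cs).length - 1) [] []
      (by omega) hj
    simp only [List.reverse_nil, List.append_nil, List.nil_append] at h
    rw [h]
    congr 2
    simp [slice]
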